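-- pv_equiv track=rewrite | github.com/DingYibin/puzzle-hitorio | main.py | parse_task_string
-- ===== SOURCE A (Python) =====
-- def parse_task_string(task: str, size: int) -> list[list[int]]:
--     """
--     解析任务字符串为二维网格
--
--     Args:
--         task: 谜题字符串（如 '4515451443254454253154453'，其中 'a'=10, 'b'=11, etc.）
--         size: 网格大小
--
--     Returns:
--         二维列表表示的谜题网格
--     """
--     grid = []
--
--     for r in range(size):
--         row = []
--         for c in range(size):
--             idx = r * size + c
--             if idx < len(task):
--                 char = task[idx]
--                 if char.isdigit():
--                     row.append(int(char))
--                 elif char.islower():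
--                     # 'a' = 10, 'b' = 11, etc.
--                     row.append(ord(char) - ord('a') + 10)
--                 else:
--                     row.append(0)
--             else:
--                 row.append(0)
--         grid.append(row)
--
--     return grid
-- ===== SOURCE B (Python) =====
-- def parse_task_string(task: str, size: int) -> list[list[int]]:
--     if size <= 0:
--         return []
--
--     def cell(ch):
--         if ch.isdigit():
--             return int(ch)
--         if ch.islower():
--             return ord(ch) - ord('a') + 10
--         return 0
--
--     flat = [cell(task[i]) if i < len(task) else 0 for i in range(size * size)]
--     return [flat[r * size:(r + 1) * size] for r in range(size)]
-- ===== Notes on version B (the rewrite author's own statement) =====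
-- stated objective: alternative
-- what changed: Replaces the nested r/c loops that append cell by cell with a parse-then-reshape decomposition: one flat pass over range(size*size) builds all cell values, then the grid is produced by slicing that flat list into size chunks.
import Mathlib
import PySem

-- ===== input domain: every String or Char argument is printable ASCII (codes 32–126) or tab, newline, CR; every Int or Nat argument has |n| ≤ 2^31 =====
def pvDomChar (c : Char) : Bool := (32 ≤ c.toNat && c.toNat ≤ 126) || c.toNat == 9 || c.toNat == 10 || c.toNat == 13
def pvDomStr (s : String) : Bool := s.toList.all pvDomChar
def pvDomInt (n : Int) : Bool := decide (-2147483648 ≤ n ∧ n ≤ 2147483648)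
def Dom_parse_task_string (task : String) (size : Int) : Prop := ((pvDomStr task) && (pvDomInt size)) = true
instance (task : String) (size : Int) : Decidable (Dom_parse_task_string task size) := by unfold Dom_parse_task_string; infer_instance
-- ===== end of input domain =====

-- B replaces A's nested append-by-append r/c loops with a parse-then-reshape decomposition
-- (one flat pass over range(size*size), then slicing into size chunks); alternative, same cost.


-- ===== PORT A =====
def parse_task_string (task : String) (size : Int) : List (List Int) :=
  let cs := task.toList
  (PySem.List.pyRange 0 size 1).foldl (fun grid r =>
    grid ++ [(PySem.List.pyRange 0 size 1).foldl (fun row c =>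
      let idx := r * size + c
      row ++ [if idx < (cs.length : Int) then
                let ch := PySem.List.pyGetD cs idx ' '
                if PySem.Chars.isdigit ch then (PySem.Int.ofChars? [ch]).getD 0
                else if PySem.Chars.islower ch then (ch.toNat : Int) - ('a'.toNat : Int) + 10
                else 0
              else 0]) []]) []

-- ===== PORT B =====
-- B-side helper: the per-cell mapping (Source B's local 'cell')
def pvCell (ch : Char) : Int :=
  if PySem.Chars.isdigit ch then (PySem.Int.ofChars? [ch]).getD 0
  else if PySem.Chars.islower ch then (ch.toNat : Int) - ('a'.toNat : Int) + 10
  else 0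

def parse_task_string_alt (task : String) (size : Int) : List (List Int) :=
  if size ≤ 0 then []
  else
    let cs := task.toList
    let flat := (PySem.List.pyRange 0 (size * size) 1).map (fun i =>
      if i < (cs.length : Int) then pvCell (PySem.List.pyGetD cs i ' ') else 0)
    (PySem.List.pyRange 0 size 1).map (fun r =>
      PySem.List.slice flat (some (r * size)) (some ((r + 1) * size)))

-- ===== PRECONDITION & SPEC =====
def Spec_parse_task_string (task : String) (size : Int) (out : List (List Int)) : Prop := out = parse_task_string_alt task size
instance (task : String) (size : Int) (out : List (List Int)) : Decidable (Spec_parse_task_string task size out) := by unfold Spec_parse_task_string; infer_instance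

-- ===== CLAIM (what is proved, stated in full; the proofs are below) =====
def Claim_equal_parse_task_string : Prop := ∀ (task : String) (size : Int), Dom_parse_task_string task size → Spec_parse_task_string task size (parse_task_string task size)

-- ===== LEMMAS AND PROOFS =====

-- slicing the flat parse at row rn yields exactly row rn's cells
lemma pv_chunk (f : Int → Int) (n rn : Nat) (h : rn < n) :
    (((List.range (n * n)).map (fun (k : Nat) => f (k : Int))).drop (rn * n)).take n
      = (List.range n).map (fun (c : Nat) => f ((rn : Int) * (n : Int) + (c : Int))) := by
  have hle : rn * n + n ≤ n * n := by
    calc rn * n + n = (rn + 1) * n := by ring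
    _ ≤ n * n := Nat.mul_le_mul_right n (by omega)
  apply List.ext_getElem
  · rw [List.length_take, List.length_drop, List.length_map, List.length_range,
      List.length_map, List.length_range]
    omega
  · intro i h1 h2
    rw [List.getElem_take, List.getElem_drop, List.getElem_map, List.getElem_map,
      List.getElem_range, List.getElem_range]
    congr 1

-- ===== VERDICT (by name: the statement is the Claim_ definition above) =====
theorem parse_task_string_spec : Claim_equal_parse_task_string := by
  intro task size _
  unfold Spec_parse_task_string parse_task_string parse_task_string_alt
  by_cases hs : size ≤ 0
  · simp [hs, PySem.List.pyRange_one_eq_nil hs]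
  · rw [not_le] at hs
    simp only [if_neg (not_le.mpr hs)]
    -- both sides as maps over the row range
    rw [PySem.List.foldl_append_singleton_eq_map]
    apply List.map_congr_left
    intro r hr
    rw [PySem.List.mem_pyRange_one] at hr
    rw [PySem.List.foldl_append_singleton_eq_map]
    -- name things on the Nat side
    obtain ⟨n, hn⟩ : ∃ n : Nat, size = (n : Int) := ⟨size.toNat, (Int.toNat_of_nonneg hs.le).symm⟩
    obtain ⟨rn, hrn⟩ : ∃ rn : Nat, r = (rn : Int) := ⟨r.toNat, (Int.toNat_of_nonneg hr.1).symm⟩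
    subst hn hrn
    have hrlt : rn < n := by exact_mod_cast hr.2
    have h1 : (rn : Int) * (n : Int) = ((rn * n : Nat) : Int) := by push_cast; ring
    have h2 : ((rn : Int) + 1) * (n : Int) = ((rn * n : Nat) : Int) + ((n : Nat) : Int) := by
      push_cast; ring
    rw [h1, h2, PySem.List.slice_natCast_add]
    have h3 : (n : Int) * (n : Int) = ((n * n : Nat) : Int) := by push_cast; ring
    rw [h3, PySem.List.pyRange_zero_natCast, PySem.List.pyRange_zero_natCast, List.map_map,
      List.map_map]
    simp only [Function.comp_def]
    rw [pv_chunk (fun i => if i < ((task.toList.length : Int)) then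
          pvCell (PySem.List.pyGetD task.toList i ' ') else 0) n rn hrlt]
    apply List.map_congr_left
    intro c _
    simp [pvCell]
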